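-- pv_equiv track=rewrite | github.com/rherbst123/Transcriber-CLI-V2 | Transcriber-CLI-V2/txt_to_csv.py | parse_transcription_text
-- ===== SOURCE A (Python) =====
-- def parse_transcription_text(transcription_text, image_name):
--     """Parse transcription text to extract structured data"""
--     lines = transcription_text.splitlines()
--     data = []
--
--     # Split into multiple records if there are duplicate field names
--     current_record = {"Image": image_name}
--     field_counts = {}
--
--     for line in lines:
--         line = line.strip()
--         if not line:
--             continue
--
--         if ":" in line and not line.startswith(("Looking at", "```", "#", "*")):
--             # Handle JSON-like content within the text
--             if line.strip().startswith('"') and line.strip().endswith('"'):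
--                 continue
--
--             key, value = line.split(":", 1)
--             key = key.strip().strip('"').strip()
--             value = value.strip().strip(',').strip('"').strip()
--
--             # Skip empty values or common non-field content
--             if not value or value.lower() in ['n/a', 'na', '']:
--                 value = "N/A"
--
--             # If we see a field we've already seen, start a new record
--             if key in field_counts and key != "Image":
--                 if current_record and len(current_record) > 1:  # More than just Image field
--                     data.append(current_record)
--                 current_record = {"Image": image_name}
--                 field_counts = {}
--
--             current_record[key] = value
--             field_counts[key] = 1
--
--     if current_record and len(current_record) > 1:  # More than just Image field
--         data.append(current_record)
--
--     return data
-- ===== SOURCE B (Python) =====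
-- def parse_transcription_text(transcription_text, image_name):
--     """Parse transcription text to extract structured data"""
--     # Pass 1: cleaned (key, value) pairs of the accepted lines.
--     pairs = []
--     for raw in transcription_text.splitlines():
--         line = raw.strip()
--         if (":" in line
--                 and not line.startswith(("Looking at", "```", "#", "*"))
--                 and not (line.startswith('"') and line.endswith('"'))):
--             k, _, v = line.partition(":")
--             k = k.strip().strip('"').strip()
--             v = v.strip().strip(',').strip('"').strip()
--             pairs.append((k, "N/A" if not v or v.lower() in ("n/a", "na") else v))
--     # Pass 2: split the pair list into maximal chunks in which no non-"Image"
--     # key repeats, then turn each chunk with at least one non-"Image" key into a record.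
--     records = []
--     i, n = 0, len(pairs)
--     while i < n:
--         keys = []
--         j = i
--         while j < n and (pairs[j][0] == "Image" or pairs[j][0] not in keys):
--             keys.append(pairs[j][0])
--             j += 1
--         image_val = image_name
--         rest = []
--         for k, v in pairs[i:j]:
--             if k == "Image":
--                 image_val = v
--             else:
--                 rest.append((k, v))
--         if rest:
--             records.append(dict([("Image", image_val)] + rest))
--         i = j
--     return records
-- ===== Notes on version B (the rewrite author's own statement) =====
-- stated objective: alternative
-- what changed: A's single stateful loop (current dict + field_counts flushed on duplicate keys) is replaced by a staged pipeline: extract the cleaned (key,value) pairs, split that pair list into maximal chunks in which no non-'Image' key repeats (a nested scan with an explicit key list), then turn each chunk into a record by resolving the 'Image' value and the remaining pairs separately and building the dict once per chunk.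
import Mathlib
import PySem

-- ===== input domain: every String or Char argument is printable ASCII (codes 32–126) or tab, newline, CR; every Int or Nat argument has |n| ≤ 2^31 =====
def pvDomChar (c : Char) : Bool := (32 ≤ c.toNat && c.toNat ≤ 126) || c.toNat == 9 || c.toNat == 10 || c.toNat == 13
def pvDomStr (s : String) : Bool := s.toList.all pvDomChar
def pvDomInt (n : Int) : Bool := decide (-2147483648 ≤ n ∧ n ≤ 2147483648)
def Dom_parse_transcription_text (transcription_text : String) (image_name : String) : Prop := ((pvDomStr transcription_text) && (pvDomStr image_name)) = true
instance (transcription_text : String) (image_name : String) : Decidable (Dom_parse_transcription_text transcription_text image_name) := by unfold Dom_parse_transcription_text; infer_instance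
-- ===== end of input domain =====

-- B replaces A's single stateful line loop (current dict + counts flushed on a
-- duplicate key) by a staged pipeline: extract all cleaned (key, value) pairs,
-- split the pair list into maximal chunks without a repeated non-"Image" key,
-- then build one record per chunk (objective: alternative decomposition).

-- ===== PORT A =====
-- loop state: (data, current_record, field_counts)
def pvAState := List (PySem.Dict String String) × PySem.Dict String String × PySem.Dict String Int

def pvAStep (image_name : String) (st : pvAState) (rawline : String) : pvAState :=
  let (data, cur, counts) := st
  let line := PySem.Str.strip rawline
  if line == "" then (data, cur, counts)
  else if PySem.Str.isIn ":" line &&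
      !(PySem.Str.startswith line "Looking at" || PySem.Str.startswith line "```" ||
        PySem.Str.startswith line "#" || PySem.Str.startswith line "*") then
    if PySem.Str.startswith (PySem.Str.strip line) "\"" &&
       PySem.Str.endswith (PySem.Str.strip line) "\"" then (data, cur, counts)
    else
      match PySem.Str.splitMax? line ":" 1 with
      | some (k0 :: v0 :: _) =>
        let key := PySem.Str.strip (PySem.Str.stripChars (PySem.Str.strip k0) "\"")
        let value := PySem.Str.strip (PySem.Str.stripChars (PySem.Str.stripChars (PySem.Str.strip v0) ",") "\"")
        let value := if value == "" || (PySem.Str.lower value == "n/a" ||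
            PySem.Str.lower value == "na" || PySem.Str.lower value == "") then "N/A" else value
        let st2 :=
          if counts.contains key && key != "Image" then
            ((if 0 < cur.size ∧ 1 < cur.size then data ++ [cur] else data),
             (PySem.Dict.empty.insert "Image" image_name : PySem.Dict String String),
             (PySem.Dict.empty : PySem.Dict String Int))
          else (data, cur, counts)
        (st2.1, st2.2.1.insert key value, st2.2.2.insert key 1)
      | _ => (data, cur, counts)   -- unreachable: ":" in line guarantees two parts
  else (data, cur, counts)

def parse_transcription_text (transcription_text : String) (image_name : String) : List (List (String × String)) :=
  let lines := PySem.Str.splitlines transcription_text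
  let init : pvAState := ([], PySem.Dict.empty.insert "Image" image_name, PySem.Dict.empty)
  let fin := lines.foldl (pvAStep image_name) init
  let data := if 0 < fin.2.1.size ∧ 1 < fin.2.1.size then fin.1 ++ [fin.2.1] else fin.1
  data.map PySem.Dict.items

-- ===== PORT B =====
-- Pass 1 of Source B: the cleaned (key, value) pair of one accepted line.
def pvExtractPair (raw_line : String) : Option (String × String) :=
  let line := PySem.Str.strip raw_line
  if PySem.Str.isIn ":" line &&
      !(PySem.Str.startswith line "Looking at" || PySem.Str.startswith line "```" ||
        PySem.Str.startswith line "#" || PySem.Str.startswith line "*") &&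
      !(PySem.Str.startswith line "\"" && PySem.Str.endswith line "\"") then
    match PySem.Str.splitMax? line ":" 1 with
    | some (k0 :: v0 :: _) =>
      let key := PySem.Str.strip (PySem.Str.stripChars (PySem.Str.strip k0) "\"")
      let value := PySem.Str.strip (PySem.Str.stripChars (PySem.Str.stripChars (PySem.Str.strip v0) ",") "\"")
      let value := if value == "" || (PySem.Str.lower value == "n/a" || PySem.Str.lower value == "na") then "N/A" else value
      some (key, value)
    | _ => none   -- unreachable: ":" in line guarantees two parts
  else none

-- inner while loop of Source B: scan the chunk, tracking the keys seen so far
def pvChunkSplit (keys : List String) : List (String × String) → List (String × String) × List (String × String)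
  | [] => ([], [])
  | p :: ps =>
    if p.1 == "Image" || !keys.contains p.1 then
      let cr := pvChunkSplit (keys ++ [p.1]) ps
      (p :: cr.1, cr.2)
    else ([], p :: ps)

-- body of Source B's `for k, v in pairs[i:j]` loop: resolve image_val / rest
def pvBStep (s : String × List (String × String)) (p : String × String) : String × List (String × String) :=
  if p.1 == "Image" then (p.2, s.2) else (s.1, s.2 ++ [p])

-- `dict([("Image", image_val)] + rest)` of one chunk, or None when rest is empty
def pvBuildRecord (image_name : String) (chunk : List (String × String)) : Option (List (String × String)) :=
  let s := chunk.foldl pvBStep (image_name, [])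
  if s.2 = [] then none
  else some ((("Image", s.1) :: s.2).foldl (fun d p => d.insert p.1 p.2)
      (PySem.Dict.empty : PySem.Dict String String)).items

theorem pvChunkSplit_snd_len (keys : List String) (ps : List (String × String)) :
    (pvChunkSplit keys ps).2.length ≤ ps.length := by
  induction ps generalizing keys with
  | nil => simp [pvChunkSplit]
  | cons p ps ih =>
    unfold pvChunkSplit
    split
    · exact Nat.le_succ_of_le (ih _)
    · simp

-- outer while loop of Source B, one chunk per iteration
def pvRecords (image_name : String) : List (String × String) → List (List (String × String))
  | [] => []
  | p :: ps =>
    let cr := pvChunkSplit [p.1] ps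
    (pvBuildRecord image_name (p :: cr.1)).toList ++ pvRecords image_name cr.2
termination_by ps => ps.length
decreasing_by
  exact Nat.lt_succ_of_le (pvChunkSplit_snd_len _ _)

def parse_transcription_text_alt (transcription_text : String) (image_name : String) : List (List (String × String)) :=
  let pairs := (PySem.Str.splitlines transcription_text).filterMap pvExtractPair
  pvRecords image_name pairs

-- ===== PRECONDITION & SPEC =====
def Spec_parse_transcription_text (transcription_text : String) (image_name : String) (out : List (List (String × String))) : Prop := out = parse_transcription_text_alt transcription_text image_name
instance (transcription_text : String) (image_name : String) (out : List (List (String × String))) : Decidable (Spec_parse_transcription_text transcription_text image_name out) := by unfold Spec_parse_transcription_text; infer_instance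

-- ===== CLAIM (what is proved, stated in full; the proofs are below) =====
def Claim_equal_parse_transcription_text : Prop := ∀ (transcription_text : String) (image_name : String), Dom_parse_transcription_text transcription_text image_name → Spec_parse_transcription_text transcription_text image_name (parse_transcription_text transcription_text image_name)

-- ===== LEMMAS AND PROOFS =====

theorem pv_lstrip_of_head (t : List Char)
    (hh : ∀ a, t.head? = some a → PySem.Chars.isspace a = false) :
    PySem.Chars.lstrip (PySem.Chars.rstrip t) = PySem.Chars.rstrip t := by
  unfold PySem.Chars.lstrip PySem.Chars.rstrip
  have hpre : (t.reverse.dropWhile PySem.Chars.isspace).reverse <+: t :=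
    List.reverse_suffix.mp (by simpa using List.dropWhile_suffix (l := t.reverse) PySem.Chars.isspace)
  cases hu : (t.reverse.dropWhile PySem.Chars.isspace).reverse with
  | nil => simp
  | cons a as =>
    rw [hu] at hpre
    obtain ⟨r, hr⟩ := hpre
    have ha : PySem.Chars.isspace a = false := hh a (by rw [← hr]; rfl)
    rw [List.dropWhile_cons, ha]
    simp

theorem pv_rstrip_rstrip (t : List Char) :
    PySem.Chars.rstrip (PySem.Chars.rstrip t) = PySem.Chars.rstrip t := by
  unfold PySem.Chars.rstrip
  simp [List.dropWhile_idempotent]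

theorem pv_strip_strip_chars (l : List Char) :
    PySem.Chars.strip (PySem.Chars.strip l) = PySem.Chars.strip l := by
  unfold PySem.Chars.strip
  rw [pv_lstrip_of_head (PySem.Chars.lstrip l) ?_, pv_rstrip_rstrip]
  intro a ha
  unfold PySem.Chars.lstrip at ha
  have hne : l.dropWhile PySem.Chars.isspace ≠ [] := by
    intro h; rw [h] at ha; simp at ha
  have hW := List.head_dropWhile_not PySem.Chars.isspace hne
  have h3 : (l.dropWhile PySem.Chars.isspace).head hne = a := by
    have h4 := List.head?_eq_some_head (l := l.dropWhile PySem.Chars.isspace) hne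
    rw [ha] at h4
    exact (Option.some_inj.mp h4.symm)
  rw [h3] at hW
  exact hW

theorem pv_strip_strip (s : String) : PySem.Str.strip (PySem.Str.strip s) = PySem.Str.strip s := by
  apply String.toList_inj.mp
  simp [pv_strip_strip_chars]

theorem pv_lower_empty (v : String) (h : (v == "") = false) : (PySem.Str.lower v == "") = false := by
  simp only [beq_eq_false_iff_ne, ne_eq] at h ⊢
  intro hc
  apply h
  apply String.toList_inj.mp
  have := congrArg String.toList hc
  simp [PySem.Chars.lower] at this ⊢
  exact this

-- A's per-line step, expressed over extracted pairs (proof-side intermediate)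
def pvPairStep (image_name : String) (st : pvAState) (p : String × String) : pvAState :=
  let st2 :=
    if st.2.2.contains p.1 && p.1 != "Image" then
      ((if 0 < st.2.1.size ∧ 1 < st.2.1.size then st.1 ++ [st.2.1] else st.1),
       (PySem.Dict.empty.insert "Image" image_name : PySem.Dict String String),
       (PySem.Dict.empty : PySem.Dict String Int))
    else st
  (st2.1, st2.2.1.insert p.1 p.2, st2.2.2.insert p.1 1)

set_option maxHeartbeats 2000000 in
theorem pvStep_sim (image_name line : String) (st : pvAState) :
    pvAStep image_name st line = (pvExtractPair line).elim st (pvPairStep image_name st) := by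
  rcases st with ⟨dA, cA, ctA⟩
  unfold pvAStep pvExtractPair
  simp only [pv_strip_strip]
  cases hc0 : (PySem.Str.strip line == "") with
  | true =>
    have h0 : PySem.Str.strip line = "" := by simpa using hc0
    have h0' : PySem.Chars.strip line.toList = [] := by
      have := congrArg String.toList h0
      simpa using this
    simp [h0', show PySem.Chars.isIn [':'] ([] : List Char) = false from by decide]
  | false =>
  cases hcin : PySem.Str.isIn ":" (PySem.Str.strip line) with
  | false => simp
  | true =>
  cases hcpre : (PySem.Str.startswith (PySem.Str.strip line) "Looking at" || PySem.Str.startswith (PySem.Str.strip line) "```" || PySem.Str.startswith (PySem.Str.strip line) "#" || PySem.Str.startswith (PySem.Str.strip line) "*") with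
  | true => simp
  | false =>
  cases hcq : (PySem.Str.startswith (PySem.Str.strip line) "\"" && PySem.Str.endswith (PySem.Str.strip line) "\"") with
  | true => simp
  | false =>
  simp only [Bool.not_false, Bool.and_self, Bool.false_eq_true, reduceIte]
  cases hsp : PySem.Str.splitMax? (PySem.Str.strip line) ":" 1 with
  | none => simp
  | some parts =>
    match parts with
    | [] => simp
    | [x] => simp
    | k0 :: v0 :: rest =>
      simp only [Option.elim]
      have hval : ∀ w : String, (w == "" || (PySem.Str.lower w == "n/a" ||
          PySem.Str.lower w == "na" || PySem.Str.lower w == "")) =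
          (w == "" || (PySem.Str.lower w == "n/a" || PySem.Str.lower w == "na")) := by
        intro w
        cases hw : (w == "") with
        | true => simp
        | false => simp [pv_lower_empty w hw]
      rw [hval]
      simp [pvPairStep]

theorem pvFold_line_pair (image_name : String) (lines : List String) (st : pvAState) :
    lines.foldl (pvAStep image_name) st =
      (lines.filterMap pvExtractPair).foldl (pvPairStep image_name) st := by
  induction lines generalizing st with
  | nil => rfl
  | cons l rest ih =>
    rw [List.filterMap_cons, List.foldl_cons]
    rw [pvStep_sim]
    cases hE : pvExtractPair l with
    | none => simpa using ih _
    | some p => simpa using ih _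

def pvFinish (st : pvAState) : List (List (String × String)) :=
  (if 1 < st.2.1.size then st.1 ++ [st.2.1] else st.1).map PySem.Dict.items

-- every element of a chunk produced by pvChunkSplit is either "Image"-keyed or fresh
def pvChunkOK : List String → List (String × String) → Prop
  | _, [] => True
  | keys, p :: c => (p.1 = "Image" ∨ p.1 ∉ keys) ∧ pvChunkOK (keys ++ [p.1]) c

theorem pvChunkOK_chunkSplit (keys : List String) (ps : List (String × String)) :
    pvChunkOK keys (pvChunkSplit keys ps).1 := by
  induction ps generalizing keys with
  | nil => simp [pvChunkSplit, pvChunkOK]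
  | cons p ps ih =>
    unfold pvChunkSplit
    split
    next h =>
      refine ⟨?_, ih _⟩
      rcases Bool.or_eq_true_iff.mp h with h1 | h1
      · exact Or.inl (by simpa using h1)
      · exact Or.inr (by simpa using h1)
    next => trivial

-- invariants of the image_val/rest fold along a chunk
theorem pvBL (c : List (String × String)) (mkeys : List String) (iv : String)
    (rest : List (String × String))
    (hok : pvChunkOK mkeys c)
    (himg : "Image" ∉ rest.map Prod.fst)
    (hnd : (rest.map Prod.fst).Nodup)
    (hiff : ∀ x : String, (x ∈ mkeys ∧ x ≠ "Image") ↔ x ∈ rest.map Prod.fst) :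
    "Image" ∉ ((c.foldl pvBStep (iv, rest)).2.map Prod.fst) ∧
    ((c.foldl pvBStep (iv, rest)).2.map Prod.fst).Nodup ∧
    (∃ t, (c.foldl pvBStep (iv, rest)).2 = rest ++ t) := by
  induction c generalizing mkeys iv rest with
  | nil => exact ⟨himg, hnd, [], by simp⟩
  | cons p c ih =>
    obtain ⟨hp, hok'⟩ := hok
    rw [List.foldl_cons]
    by_cases hI : p.1 = "Image"
    · rw [show pvBStep (iv, rest) p = (p.2, rest) by simp [pvBStep, hI]]
      exact ih (mkeys ++ [p.1]) p.2 rest hok' himg hnd (by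
        intro x
        rw [← hiff x]
        constructor
        · rintro ⟨hx, hxI⟩
          refine ⟨?_, hxI⟩
          rcases List.mem_append.mp hx with h | h
          · exact h
          · exact absurd (by simpa [hI] using h) hxI
        · rintro ⟨hx, hxI⟩; exact ⟨List.mem_append_left _ hx, hxI⟩)
    · have hpm : p.1 ∉ mkeys := by
        rcases hp with h | h
        · exact absurd h hI
        · exact h
      have hpr : p.1 ∉ rest.map Prod.fst := fun hc => hpm ((hiff p.1).mpr hc).1
      rw [show pvBStep (iv, rest) p = (iv, rest ++ [p]) by simp [pvBStep, hI]]
      have := ih (mkeys ++ [p.1]) iv (rest ++ [p]) hok'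
        (by simp [himg, Ne.symm hI])
        (by
          simp only [List.map_append, List.map_cons, List.map_nil]
          rw [List.nodup_append]
          refine ⟨hnd, by simp, ?_⟩
          intro a ha b hb
          rw [List.mem_singleton.mp hb]
          intro h
          rw [h] at ha
          exact hpr ha)
        (by
          intro x
          simp only [List.map_append, List.map_cons, List.map_nil, List.mem_append,
            List.mem_singleton, ← hiff x]
          constructor
          · rintro ⟨hx, hxI⟩
            rcases hx with h | h
            · exact Or.inl ⟨h, hxI⟩
            · exact Or.inr h
          · rintro (⟨hx, hxI⟩ | hx)
            · exact ⟨Or.inl hx, hxI⟩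
            · exact ⟨Or.inr hx, by rw [hx] at *; exact hI⟩)
      refine ⟨this.1, this.2.1, ?_⟩
      obtain ⟨t, ht⟩ := this.2.2
      exact ⟨p :: t, by rw [ht]; simp⟩

-- normalize one pvRecords step: the dict build is the literal record list
theorem pvRecords_eq (image_name : String) (p : String × String) (ps : List (String × String)) :
    pvRecords image_name (p :: ps) =
      (let s := ((pvChunkSplit [p.1] ps).1).foldl pvBStep (pvBStep (image_name, []) p)
       if s.2 = [] then [] else [("Image", s.1) :: s.2]) ++
        pvRecords image_name (pvChunkSplit [p.1] ps).2 := by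
  have hok : pvChunkOK [p.1] (pvChunkSplit [p.1] ps).1 := pvChunkOK_chunkSplit _ _
  have hBL : "Image" ∉ ((((pvChunkSplit [p.1] ps).1).foldl pvBStep (pvBStep (image_name, []) p)).2.map Prod.fst) ∧
      ((((pvChunkSplit [p.1] ps).1).foldl pvBStep (pvBStep (image_name, []) p)).2.map Prod.fst).Nodup := by
    by_cases hI : p.1 = "Image"
    · rw [show pvBStep (image_name, []) p = (p.2, []) by simp [pvBStep, hI]]
      have := pvBL _ [p.1] p.2 [] hok (by simp) (by simp)
        (by intro x; simp [hI])
      exact ⟨this.1, this.2.1⟩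
    · rw [show pvBStep (image_name, []) p = (image_name, [p]) by simp [pvBStep, hI]]
      have := pvBL _ [p.1] image_name [p] hok (by simp [Ne.symm hI]) (by simp)
        (by
          intro x
          simp only [List.mem_singleton, List.map_cons, List.map_nil]
          constructor
          · rintro ⟨h, -⟩; simp [h]
          · intro h
            exact ⟨h, by rw [h]; exact hI⟩)
      exact ⟨this.1, this.2.1⟩
  rw [pvRecords]
  unfold pvBuildRecord
  simp only [List.foldl_cons]
  by_cases hE : (((pvChunkSplit [p.1] ps).1).foldl pvBStep (pvBStep (image_name, []) p)).2 = []
  · simp [hE]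
  · simp only [hE, if_false]
    rw [PySem.Dict.items_foldl_insert_fresh _ Prod.fst Prod.snd _
      (by
        intro a ha
        rw [PySem.Dict.contains_insert]
        have : a.1 ≠ "Image" := by
          intro h
          exact hBL.1 (h ▸ List.mem_map_of_mem ha)
        simp [this, PySem.Dict.contains_empty])
      hBL.2]
    rw [PySem.Dict.items_insert_of_not_contains _ _ (PySem.Dict.contains_empty _)]
    simp [PySem.Dict.empty]

set_option maxHeartbeats 1600000 in
-- main simulation: A's pair fold from a mid-chunk state = B's chunked output
theorem pvML (image_name : String) (ps : List (String × String)) :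
    ∀ (data : List (PySem.Dict String String)) (cur : PySem.Dict String String)
      (counts : PySem.Dict String Int) (iv : String) (rest : List (String × String))
      (mkeys : List String),
    cur.items = ("Image", iv) :: rest →
    (∀ x, counts.contains x = mkeys.contains x) →
    ("Image" ∉ rest.map Prod.fst) →
    ((rest.map Prod.fst).Nodup) →
    (∀ x : String, (x ∈ mkeys ∧ x ≠ "Image") ↔ x ∈ rest.map Prod.fst) →
    pvFinish (ps.foldl (pvPairStep image_name) (data, cur, counts)) =
      data.map PySem.Dict.items ++
        ((let s := ((pvChunkSplit mkeys ps).1).foldl pvBStep (iv, rest)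
          if s.2 = [] then [] else [("Image", s.1) :: s.2]) ++
          pvRecords image_name (pvChunkSplit mkeys ps).2) := by
  induction ps with
  | nil =>
    intro data cur counts iv rest mkeys hitems hcnt himg hnd hiff
    have hsz : cur.size = rest.length + 1 := by
      simp [PySem.Dict.size, hitems]
    simp only [List.foldl_nil]
    rw [show pvChunkSplit mkeys ([] : List (String × String)) = ([], []) from rfl]
    simp only [List.foldl_nil]
    unfold pvFinish
    by_cases hrest : rest = []
    · subst hrest
      simp [hsz, pvRecords]
    · have h1 : 1 < cur.size := by
        rw [hsz]
        have := List.length_pos_iff.mpr hrest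
        omega
      simp [h1, hrest, hitems, pvRecords]
  | cons p ps ih =>
    intro data cur counts iv rest mkeys hitems hcnt himg hnd hiff
    obtain ⟨pk, pv⟩ := p
    have hkeys : cur.keys = "Image" :: rest.map Prod.fst := by
      simp [PySem.Dict.keys, hitems]
    rw [List.foldl_cons]
    by_cases hIm : pk = "Image"
    · -- "Image" key: never a trigger, always taken into the chunk
      subst hIm
      have hccur : cur.contains "Image" = true := by
        rw [PySem.Dict.contains_eq_decide_mem_keys, hkeys]; simp
      have hstep : pvPairStep image_name (data, cur, counts) ("Image", pv) =
          (data, cur.insert "Image" pv, counts.insert "Image" 1) := by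
        simp [pvPairStep]
      have hsplit : pvChunkSplit mkeys (("Image", pv) :: ps) =
          ((("Image", pv)) :: (pvChunkSplit (mkeys ++ ["Image"]) ps).1,
           (pvChunkSplit (mkeys ++ ["Image"]) ps).2) := by
        simp [pvChunkSplit]
      rw [hstep, hsplit]
      simp only [List.foldl_cons]
      rw [show pvBStep (iv, rest) ("Image", pv) = (pv, rest) by simp [pvBStep]]
      refine ih data _ _ pv rest (mkeys ++ ["Image"]) ?_ ?_ himg hnd ?_
      · rw [PySem.Dict.items_insert_of_contains _ _ hccur, hitems]
        simp only [List.map_cons, BEq.rfl, if_true]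
        congr 1
        refine (List.map_congr_left ?_).trans (List.map_id rest)
        intro q hq
        have : q.1 ≠ "Image" := by
          intro h
          exact himg (h ▸ List.mem_map_of_mem hq)
        simp [this]
      · intro x
        simp [PySem.Dict.contains_insert, hcnt x, Bool.or_comm, beq_eq_decide]
      · intro x
        rw [← hiff x]
        constructor
        · rintro ⟨hx, hxI⟩
          refine ⟨?_, hxI⟩
          rcases List.mem_append.mp hx with h | h
          · exact h
          · exact absurd (by simpa using h) hxI
        · rintro ⟨hx, hxI⟩
          exact ⟨List.mem_append_left _ hx, hxI⟩
    · by_cases hc : pk ∈ mkeys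
      · -- trigger: flush the current record and start a fresh chunk
        have hrmem : pk ∈ rest.map Prod.fst := (hiff pk).mp ⟨hc, hIm⟩
        have hrne : rest ≠ [] := by
          intro h; rw [h] at hrmem; simp at hrmem
        have hsz : cur.size = rest.length + 1 := by
          simp [PySem.Dict.size, hitems]
        have hguard : 0 < cur.size ∧ 1 < cur.size := by
          rw [hsz]
          have := List.length_pos_iff.mpr hrne
          omega
        have hcontains : counts.contains pk = true := by
          rw [hcnt pk]; simp [hc]
        have hstep : pvPairStep image_name (data, cur, counts) (pk, pv) =
            (data ++ [cur], (PySem.Dict.empty.insert "Image" image_name).insert pk pv,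
             (PySem.Dict.empty : PySem.Dict String Int).insert pk 1) := by
          simp [pvPairStep, hcontains, hIm, hguard]
        have hsplit : pvChunkSplit mkeys ((pk, pv) :: ps) = ([], (pk, pv) :: ps) := by
          simp [pvChunkSplit, hIm, hc]
        rw [hstep, hsplit]
        simp only [List.foldl_nil]
        rw [ih (data ++ [cur]) _ _ image_name [(pk, pv)] [pk] ?_ ?_ ?_ ?_ ?_]
        · rw [pvRecords_eq image_name (pk, pv) ps]
          rw [show pvBStep (image_name, []) (pk, pv) = (image_name, [(pk, pv)]) by
            simp [pvBStep, hIm]]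
          simp [hitems, hrne]
        · rw [PySem.Dict.items_insert_of_not_contains _ _ (by
            rw [PySem.Dict.contains_insert]
            simp [hIm, PySem.Dict.contains_empty])]
          rw [PySem.Dict.items_insert_of_not_contains _ _ (PySem.Dict.contains_empty _)]
          simp [PySem.Dict.empty]
        · intro x
          simp [PySem.Dict.contains_insert, PySem.Dict.contains_empty, beq_eq_decide]
        · simp [Ne.symm hIm]
        · simp
        · intro x
          simp only [List.mem_singleton, List.map_cons, List.map_nil]
          constructor
          · rintro ⟨h, -⟩; simp [h]
          · intro h
            exact ⟨h, by rw [h]; exact hIm⟩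
      · -- fresh non-"Image" key: no trigger, taken into the chunk
        have hcontains : counts.contains pk = false := by
          rw [hcnt pk]; simp [hc]
        have hccur : cur.contains pk = false := by
          rw [PySem.Dict.contains_eq_decide_mem_keys, hkeys]
          have : pk ∉ rest.map Prod.fst := fun h => hc ((hiff pk).mpr h).1
          simp [hIm, this]
        have hstep : pvPairStep image_name (data, cur, counts) (pk, pv) =
            (data, cur.insert pk pv, counts.insert pk 1) := by
          simp [pvPairStep, hcontains]
        have hsplit : pvChunkSplit mkeys ((pk, pv) :: ps) =
            (((pk, pv)) :: (pvChunkSplit (mkeys ++ [pk]) ps).1,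
             (pvChunkSplit (mkeys ++ [pk]) ps).2) := by
          simp [pvChunkSplit]
          exact fun _ => hc
        rw [hstep, hsplit]
        simp only [List.foldl_cons]
        rw [show pvBStep (iv, rest) (pk, pv) = (iv, rest ++ [(pk, pv)]) by
          simp [pvBStep, hIm]]
        refine ih data _ _ iv (rest ++ [(pk, pv)]) (mkeys ++ [pk]) ?_ ?_ ?_ ?_ ?_
        · rw [PySem.Dict.items_insert_of_not_contains _ _ hccur, hitems]
          simp
        · intro x
          simp [PySem.Dict.contains_insert, hcnt x, Bool.or_comm, beq_eq_decide]
        · simp [himg, Ne.symm hIm]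
        · simp only [List.map_append, List.map_cons, List.map_nil]
          rw [List.nodup_append]
          refine ⟨hnd, by simp, ?_⟩
          intro a ha b hb
          rw [List.mem_singleton.mp hb]
          intro h
          rw [h] at ha
          exact (fun hcc => hc ((hiff pk).mpr hcc).1) ha
        · intro x
          simp only [List.map_append, List.map_cons, List.map_nil, List.mem_append,
            List.mem_singleton, ← hiff x]
          constructor
          · rintro ⟨hx, hxI⟩
            rcases hx with h | h
            · exact Or.inl ⟨h, hxI⟩
            · exact Or.inr h
          · rintro (⟨hx, hxI⟩ | hx)
            · exact ⟨Or.inl hx, hxI⟩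
            · exact ⟨Or.inr hx, by rw [hx] at *; exact hIm⟩

-- ===== VERDICT (by name: the statement is the Claim_ definition above) =====
theorem parse_transcription_text_spec : Claim_equal_parse_transcription_text := by
  intro t img _
  unfold Spec_parse_transcription_text parse_transcription_text parse_transcription_text_alt
  simp only []
  rw [pvFold_line_pair]
  have hfin : ∀ st : pvAState,
      (if 0 < st.2.1.size ∧ 1 < st.2.1.size then st.1 ++ [st.2.1] else st.1).map PySem.Dict.items =
        pvFinish st := by
    intro st
    unfold pvFinish
    split_ifs with h1 h2 <;> first | rfl | (exfalso; omega)
  rw [hfin]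
  rw [pvML img ((PySem.Str.splitlines t).filterMap pvExtractPair) [] _ _ img [] []
    (by
      rw [PySem.Dict.items_insert_of_not_contains _ _ (PySem.Dict.contains_empty _)]
      simp [PySem.Dict.empty])
    (by intro x; simp [PySem.Dict.contains_empty])
    (by simp) (by simp) (by intro x; simp)]
  cases hps : (PySem.Str.splitlines t).filterMap pvExtractPair with
  | nil => simp [pvRecords, pvChunkSplit]
  | cons p ps =>
    have hsplit : pvChunkSplit [] (p :: ps) =
        (p :: (pvChunkSplit [p.1] ps).1, (pvChunkSplit [p.1] ps).2) := by
      simp [pvChunkSplit]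
    rw [hsplit, pvRecords_eq img p ps]
    simp only [List.foldl_cons, List.map_nil, List.nil_append]
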